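-- pv_equiv track=rewrite | github.com/LautaroBlasco23/document-assistant | backend/application/agents/question_generator.py | _validate_matching
-- ===== SOURCE A (Python) =====
-- def _validate_matching(item: dict) -> bool:
--     pairs = item.get("pairs", [])
--     if not isinstance(pairs, list) or not (3 <= len(pairs) <= 6):
--         return False
--     terms = []
--     definitions = []
--     for pair in pairs:
--         if not isinstance(pair, dict):
--             return False
--         term = pair.get("term", "")
--         definition = pair.get("definition", "")
--         if not isinstance(term, str) or not term.strip():
--             return False
--         if not isinstance(definition, str) or not definition.strip():
--             return False
--         terms.append(term.strip())
--         definitions.append(definition.strip())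
--     if len(set(terms)) != len(terms):
--         return False
--     if len(set(definitions)) != len(definitions):
--         return False
--     return True
-- ===== SOURCE B (Python) =====
-- def _validate_matching(item: dict) -> bool:
--     pairs = item.get("pairs", [])
--     if not isinstance(pairs, list) or not (3 <= len(pairs) <= 6):
--         return False
--     if any(not isinstance(p, dict)
--            or not isinstance(p.get("term", ""), str)
--            or not isinstance(p.get("definition", ""), str)
--            for p in pairs):
--         return False
--     terms = [p.get("term", "").strip() for p in pairs]
--     definitions = [p.get("definition", "").strip() for p in pairs]
--     if "" in terms or "" in definitions:
--         return False
--     return all(terms[i] not in terms[i + 1:] and definitions[i] not in definitions[i + 1:]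
--                for i in range(len(pairs)))
-- ===== Notes on version B (the rewrite author's own statement) =====
-- stated objective: alternative
-- what changed: Replaces A's single validation loop that accumulates two lists and then compares len(set(...)) with len(...) by staged comprehensions (type pass, two stripped projections, an emptiness test) and a brute-force pairwise duplicate scan comparing each element against the suffix after it, with no sets at all.
import Mathlib
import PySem

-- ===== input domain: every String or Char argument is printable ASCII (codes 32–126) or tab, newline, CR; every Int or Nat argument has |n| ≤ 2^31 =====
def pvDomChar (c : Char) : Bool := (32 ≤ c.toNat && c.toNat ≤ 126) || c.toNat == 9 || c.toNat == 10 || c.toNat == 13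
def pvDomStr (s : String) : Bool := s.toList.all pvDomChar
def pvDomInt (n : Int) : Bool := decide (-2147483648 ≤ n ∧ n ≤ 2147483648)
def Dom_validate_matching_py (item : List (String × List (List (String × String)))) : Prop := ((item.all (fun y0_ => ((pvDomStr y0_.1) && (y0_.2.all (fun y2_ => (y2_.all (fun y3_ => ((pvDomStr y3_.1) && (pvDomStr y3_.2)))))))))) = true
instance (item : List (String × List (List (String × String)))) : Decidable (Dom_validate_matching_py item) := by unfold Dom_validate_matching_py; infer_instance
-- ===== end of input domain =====

-- B replaces A's accumulate-two-lists-then-compare-set-lengths scheme by staged comprehensions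
-- and a pairwise suffix scan for duplicates (no sets); alternative decomposition, same values.


-- ===== PORT A =====
-- the for-loop of A: build the two stripped lists, none = an early 'return False'
def pvAcollect : List (List (String × String)) → List String → List String →
    Option (List String × List String)
  | [], terms, definitions => some (terms, definitions)
  | pair :: rest, terms, definitions =>
    let term := PySem.Dict.getD (PySem.Dict.mk pair) "term" ""
    let definition := PySem.Dict.getD (PySem.Dict.mk pair) "definition" ""
    if PySem.Str.strip term = "" then none
    else if PySem.Str.strip definition = "" then none
    else pvAcollect rest (terms ++ [PySem.Str.strip term]) (definitions ++ [PySem.Str.strip definition])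

-- A's code after the loop: the two len(set(..)) != len(..) checks
def pvAfinish : Option (List String × List String) → Bool
  | none => false
  | some (terms, definitions) =>
    if PySem.Set.len (PySem.Set.ofList terms) ≠ (terms.length : Int) then false
    else if PySem.Set.len (PySem.Set.ofList definitions) ≠ (definitions.length : Int) then false
    else true

def validate_matching_py (item : List (String × List (List (String × String)))) : Bool :=
  let pairs := PySem.Dict.getD (PySem.Dict.mk item) "pairs" []
  if ¬ (3 ≤ pairs.length ∧ pairs.length ≤ 6) then false
  else pvAfinish (pvAcollect pairs [] [])

-- ===== PORT B =====
-- B's stripped projections: p.get("term","").strip() / p.get("definition","").strip()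
def pvBterm (pair : List (String × String)) : String :=
  PySem.Str.strip (PySem.Dict.getD (PySem.Dict.mk pair) "term" "")
def pvBdef (pair : List (String × String)) : String :=
  PySem.Str.strip (PySem.Dict.getD (PySem.Dict.mk pair) "definition" "")

-- B: staged comprehensions; the isinstance 'any' pass is vacuous under the typed domain.
-- Final stage: all(terms[i] not in terms[i+1:] and definitions[i] not in definitions[i+1:] for i in range(len(pairs)))
def validate_matching_py_alt (item : List (String × List (List (String × String)))) : Bool :=
  let pairs := PySem.Dict.getD (PySem.Dict.mk item) "pairs" []
  if ¬ (3 ≤ pairs.length ∧ pairs.length ≤ 6) then false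
  else
    let terms := pairs.map pvBterm
    let definitions := pairs.map pvBdef
    if terms.contains "" || definitions.contains "" then false
    else (PySem.List.pyRange 0 (pairs.length : Int) 1).all (fun i =>
      !((PySem.List.slice terms (some (i + 1)) none).contains (PySem.List.pyGetD terms i "")) &&
      !((PySem.List.slice definitions (some (i + 1)) none).contains (PySem.List.pyGetD definitions i "")))

-- ===== PRECONDITION & SPEC =====
def Spec_validate_matching_py (item : List (String × List (List (String × String)))) (out : Bool) : Prop := out = validate_matching_py_alt item
instance (item : List (String × List (List (String × String)))) (out : Bool) : Decidable (Spec_validate_matching_py item out) := by unfold Spec_validate_matching_py; infer_instance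

-- ===== CLAIM (what is proved, stated in full; the proofs are below) =====
def Claim_equal_validate_matching_py : Prop := ∀ (item : List (String × List (List (String × String)))), Dom_validate_matching_py item → Spec_validate_matching_py item (validate_matching_py item)

-- ===== LEMMAS AND PROOFS =====

-- A's loop in closed form: none iff some pair strips empty, else the two accumulated lists.
lemma pvAcollect_eq : ∀ (pairs : List (List (String × String))) (ts ds : List String),
    pvAcollect pairs ts ds =
      if pairs.any (fun p => pvBterm p == "" || pvBdef p == "") then none
      else some (ts ++ pairs.map pvBterm, ds ++ pairs.map pvBdef) := by
  intro pairs
  induction pairs with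
  | nil => intro ts ds; simp [pvAcollect]
  | cons p rest ih =>
    intro ts ds
    simp only [pvAcollect]
    by_cases h1 : PySem.Str.strip (PySem.Dict.getD (PySem.Dict.mk p) "term" "") = ""
    · simp [h1, pvBterm]
    · by_cases h2 : PySem.Str.strip (PySem.Dict.getD (PySem.Dict.mk p) "definition" "") = ""
      · simp [h1, h2, pvBterm, pvBdef]
      · rw [if_neg h1, if_neg h2, ih]
        simp [pvBterm, pvBdef, h1, h2]

lemma pv_ofList_length_lt_of_not_nodup {α : Type} [BEq α] [LawfulBEq α] :
    ∀ (xs : List α), ¬ xs.Nodup → (PySem.Set.ofList xs).length < xs.length := by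
  intro xs
  induction xs with
  | nil => simp
  | cons x xs ih =>
    intro h
    rw [PySem.Set.ofList_cons]
    simp only [List.length_cons]
    by_cases hx : x ∈ xs
    · have h1 : ((PySem.Set.ofList xs).discard x).length < (PySem.Set.ofList xs).length := by
        unfold PySem.Set.discard
        refine List.length_filter_lt_length_iff_exists.mpr ⟨x, ?_, by simp⟩
        exact (PySem.Set.mem_ofList xs x).mpr hx
      have h2 := PySem.Set.length_ofList_le xs
      omega
    · have hxs : ¬ xs.Nodup := fun hn => h (by simp [List.nodup_cons, hx, hn])
      have h1 := ih hxs
      have h2 : ((PySem.Set.ofList xs).discard x).length ≤ (PySem.Set.ofList xs).length := by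
        unfold PySem.Set.discard; exact List.length_filter_le _ _
      omega

-- A's post-loop test is exactly the two Nodup conditions.
lemma pvAfinish_eq (ts ds : List String) :
    pvAfinish (some (ts, ds)) = (decide ts.Nodup && decide ds.Nodup) := by
  simp only [pvAfinish, PySem.Set.len]
  split_ifs with hA hB
  · have : ¬ ts.Nodup := by
      intro hn; rw [PySem.Set.ofList_eq_self_of_nodup ts hn] at hA; exact hA rfl
    simp [this]
  · have : ¬ ds.Nodup := by
      intro hn; rw [PySem.Set.ofList_eq_self_of_nodup ds hn] at hB; exact hB rfl
    simp [this]
  · have h1 : ts.Nodup := by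
      by_contra hn
      have := pv_ofList_length_lt_of_not_nodup ts hn
      exact hA (by omega)
    have h2 : ds.Nodup := by
      by_contra hn
      have := pv_ofList_length_lt_of_not_nodup ds hn
      exact hB (by omega)
    simp [h1, h2]

-- B's suffix scan over one list is exactly Nodup.
lemma pv_suffix_scan_eq_nodup : ∀ (xs : List String),
    (List.range xs.length).all (fun k => !((xs.drop (k + 1)).contains (xs.getD k ""))) =
      decide xs.Nodup := by
  intro xs
  induction xs with
  | nil => simp
  | cons x t ih =>
    rw [List.length_cons, List.range_succ_eq_map, List.all_cons, List.all_map]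
    have hfun : (fun k => !(((x :: t).drop (k + 1 + 1)).contains ((x :: t).getD (k + 1) ""))) =
        (fun k => !((t.drop (k + 1)).contains (t.getD k ""))) := by
      funext k
      simp
    simp only [Function.comp_def, hfun, ih]
    by_cases hx : x ∈ t <;> by_cases hn : t.Nodup <;>
      simp [hx, hn, List.nodup_cons]

-- B's combined range-all splits into the two per-list scans.
lemma pv_all_and {α : Type} (l : List α) (p q : α → Bool) :
    l.all (fun x => p x && q x) = (l.all p && l.all q) := by
  induction l with
  | nil => simp
  | cons x t ih =>
    simp only [List.all_cons, ih]
    cases p x <;> cases q x <;> cases t.all p <;> cases t.all q <;> rfl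

-- rewrite B's pyRange/slice/pyGetD stage into the List.range suffix scan
lemma pv_range_scan_eq (xs : List String) :
    (PySem.List.pyRange 0 (xs.length : Int) 1).all
        (fun i => !((PySem.List.slice xs (some (i + 1)) none).contains (PySem.List.pyGetD xs i ""))) =
      (List.range xs.length).all (fun k => !((xs.drop (k + 1)).contains (xs.getD k ""))) := by
  rw [PySem.List.pyRange_one]
  simp only [Int.sub_zero, Int.toNat_natCast, List.all_map, Function.comp_def]
  have hfun : (fun k : Nat =>
        !((PySem.List.slice xs (some ((0 : Int) + (k : Int) + 1)) none).contains
            (PySem.List.pyGetD xs ((0 : Int) + (k : Int)) ""))) =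
      (fun k : Nat => !((xs.drop (k + 1)).contains (xs.getD k ""))) := by
    funext k
    have h1 : (0 : Int) + (k : Int) + 1 = ((k + 1 : Nat) : Int) := by push_cast; ring
    have h2 : (0 : Int) + (k : Int) = ((k : Nat) : Int) := by ring
    rw [h1, h2, PySem.List.slice_from_natCast, PySem.List.pyGetD_natCast]
  rw [hfun]

-- ===== VERDICT (by name: the statement is the Claim_ definition above) =====
theorem validate_matching_py_spec : Claim_equal_validate_matching_py := by
  intro item _
  unfold Spec_validate_matching_py
  simp only [validate_matching_py, validate_matching_py_alt]
  by_cases h : 3 ≤ (PySem.Dict.getD (PySem.Dict.mk item) "pairs" []).length ∧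
      (PySem.Dict.getD (PySem.Dict.mk item) "pairs" []).length ≤ 6
  · rw [if_neg (not_not_intro h), if_neg (not_not_intro h), pvAcollect_eq]
    generalize (PySem.Dict.getD (PySem.Dict.mk item) "pairs" []) = pairs at *
    by_cases he : pairs.any (fun p => pvBterm p == "" || pvBdef p == "") = true
    · rw [if_pos he]
      have hc : ((pairs.map pvBterm).contains "" || (pairs.map pvBdef).contains "") = true := by
        simp only [List.any_eq_true, Bool.or_eq_true, beq_iff_eq] at he
        obtain ⟨p, hp, hpe⟩ := he
        simp only [Bool.or_eq_true, List.contains_iff_mem, List.mem_map]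
        rcases hpe with hpe | hpe
        · exact Or.inl ⟨p, hp, hpe⟩
        · exact Or.inr ⟨p, hp, hpe⟩
      rw [if_pos hc]
      rfl
    · rw [if_neg he]
      have hc : ¬ ((pairs.map pvBterm).contains "" || (pairs.map pvBdef).contains "") = true := by
        simp only [List.any_eq_true, Bool.or_eq_true, beq_iff_eq] at he
        simp only [Bool.or_eq_true, List.contains_iff_mem, List.mem_map]
        rintro (⟨p, hp, hpe⟩ | ⟨p, hp, hpe⟩)
        · exact he ⟨p, hp, Or.inl hpe⟩
        · exact he ⟨p, hp, Or.inr hpe⟩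
      rw [if_neg hc]
      simp only [List.nil_append]
      rw [pvAfinish_eq]
      have hsplit := pv_all_and (PySem.List.pyRange 0 (pairs.length : Int) 1)
        (fun i => !((PySem.List.slice (pairs.map pvBterm) (some (i + 1)) none).contains
            (PySem.List.pyGetD (pairs.map pvBterm) i "")))
        (fun i => !((PySem.List.slice (pairs.map pvBdef) (some (i + 1)) none).contains
            (PySem.List.pyGetD (pairs.map pvBdef) i "")))
      rw [hsplit]
      have hl1 : (pairs.length : Int) = ((pairs.map pvBterm).length : Int) := by simp
      have hl2 : (pairs.length : Int) = ((pairs.map pvBdef).length : Int) := by simp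
      rw [show (PySem.List.pyRange 0 (pairs.length : Int) 1).all
            (fun i => !((PySem.List.slice (pairs.map pvBterm) (some (i + 1)) none).contains
                (PySem.List.pyGetD (pairs.map pvBterm) i ""))) =
          decide (pairs.map pvBterm).Nodup from by
        rw [hl1, pv_range_scan_eq, pv_suffix_scan_eq_nodup]]
      rw [show (PySem.List.pyRange 0 (pairs.length : Int) 1).all
            (fun i => !((PySem.List.slice (pairs.map pvBdef) (some (i + 1)) none).contains
                (PySem.List.pyGetD (pairs.map pvBdef) i ""))) =
          decide (pairs.map pvBdef).Nodup from by
        rw [hl2, pv_range_scan_eq, pv_suffix_scan_eq_nodup]]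
  · rw [if_pos h, if_pos h]
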